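-- pv_equiv track=rewrite | github.com/bgates747/agon-bbc-basic-adl-ez80asm | utils/scripts/read_bin.py | expand_missing_addresses
-- ===== SOURCE A (Python) =====
-- def expand_missing_addresses(lines, bin_size):
--     """Expand missing addresses by calculating gaps between addresses."""
--     expanded_lines = []
--     for i in range(len(lines) - 1):
--         address, source_code = lines[i]
--         next_address = lines[i + 1][0]
--
--         # Append the current line
--         expanded_lines.append((address, source_code))
--
--         # Calculate the gap and expand missing addresses
--         gap = next_address - address - 1
--         for j in range(1, gap + 1):
--             expanded_lines.append((address + j, ''))  # Insert blank source code for missing lines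
--
--     # Handle the last line
--     last_address, last_source_code = lines[-1]
--     expanded_lines.append((last_address, last_source_code))
--
--     # Fill remaining addresses up to the bin file size
--     end_address = last_address + 1
--     for addr in range(end_address, bin_size):
--         expanded_lines.append((addr, ''))
--
--     return expanded_lines
-- ===== SOURCE B (Python) =====
-- def expand_missing_addresses(lines, bin_size):
--     """Expand missing addresses by calculating gaps between addresses.
--
--     Built back-to-front: walk the lines in reverse, threading the upper
--     boundary (initially bin_size, then the address of the later line) and
--     prepending each line's block of (line, blanks).
--     """
--     out = []
--     bound = bin_size
--     for addr, src in reversed(lines):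
--         out = [(addr, src)] + [(addr + j, '') for j in range(1, bound - addr)] + out
--         bound = addr
--     return out
-- ===== Notes on version B (the rewrite author's own statement) =====
-- stated objective: alternative
-- what changed: B builds the output back-to-front: it walks the lines in reverse, threading the upper boundary as loop state (bin_size, then the previously processed line's address) and prepending each line's block, instead of A's forward index loop with a lines[i+1] lookahead plus a separate last-line append and tail-fill loop.
import Mathlib
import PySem

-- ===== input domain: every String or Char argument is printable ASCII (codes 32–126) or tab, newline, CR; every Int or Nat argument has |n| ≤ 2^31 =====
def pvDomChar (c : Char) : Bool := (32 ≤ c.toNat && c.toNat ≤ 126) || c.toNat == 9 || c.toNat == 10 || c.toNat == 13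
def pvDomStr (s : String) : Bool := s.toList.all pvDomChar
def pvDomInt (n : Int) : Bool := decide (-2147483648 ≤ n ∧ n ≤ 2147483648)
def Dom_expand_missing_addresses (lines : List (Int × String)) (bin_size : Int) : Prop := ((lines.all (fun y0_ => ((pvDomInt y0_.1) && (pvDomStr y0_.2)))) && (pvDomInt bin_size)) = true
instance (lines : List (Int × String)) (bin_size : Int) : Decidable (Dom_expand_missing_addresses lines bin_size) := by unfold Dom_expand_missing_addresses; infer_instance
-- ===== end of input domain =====

-- B builds the output back-to-front: a reverse walk threading the upper boundary as loop
-- state and prepending each block, replacing A's forward lookahead loop + tail-fill pass.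

-- ===== PORT A =====
-- the body of A's outer 'for i in range(len(lines) - 1)' loop
def pvStepA (lines : List (Int × String)) (acc : List (Int × String)) (i : Int) : List (Int × String) :=
  let cur := PySem.List.pyGetD lines i (0, "")            -- lines[i]  (i always in range here)
  let next_address := (PySem.List.pyGetD lines (i + 1) (0, "")).1   -- lines[i+1][0]
  let acc := acc ++ [cur]
  let gap := next_address - cur.1 - 1
  (PySem.List.pyRange 1 (gap + 1) 1).foldl (fun a j => a ++ [(cur.1 + j, "")]) acc

def expand_missing_addresses (lines : List (Int × String)) (bin_size : Int) : List (Int × String) :=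
  let expanded := (PySem.List.pyRange 0 ((lines.length : Int) - 1) 1).foldl (pvStepA lines) []
  match PySem.List.pyGet? lines (-1) with                  -- lines[-1]; none = IndexError (excluded by Pre_)
  | none => []
  | some last =>
    let expanded := expanded ++ [last]
    (PySem.List.pyRange (last.1 + 1) bin_size 1).foldl (fun a addr => a ++ [(addr, "")]) expanded

-- ===== PORT B =====
-- reversed(lines) loop with state (out, bound); each step prepends the line's block
def expand_missing_addresses_alt (lines : List (Int × String)) (bin_size : Int) : List (Int × String) :=
  (lines.reverse.foldl
    (fun s p =>
      ((p :: (PySem.List.pyRange 1 (s.2 - p.1) 1).map (fun j => (p.1 + j, ""))) ++ s.1, p.1))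
    (([] : List (Int × String)), bin_size)).1

-- ===== PRECONDITION & SPEC =====
-- Pre_ excludes only the empty list, on which A raises IndexError at lines[-1].
def Pre_expand_missing_addresses (lines : List (Int × String)) (bin_size : Int) : Prop := lines ≠ []
instance (lines : List (Int × String)) (bin_size : Int) : Decidable (Pre_expand_missing_addresses lines bin_size) := by unfold Pre_expand_missing_addresses; infer_instance
def pvWitness_expand_missing_addresses : (List (Int × String)) × Int := ([(0, "a"), (3, "b")], 6)

def Spec_expand_missing_addresses (lines : List (Int × String)) (bin_size : Int) (out : List (Int × String)) : Prop := out = expand_missing_addresses_alt lines bin_size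
instance (lines : List (Int × String)) (bin_size : Int) (out : List (Int × String)) : Decidable (Spec_expand_missing_addresses lines bin_size out) := by unfold Spec_expand_missing_addresses; infer_instance

-- ===== CLAIM (what is proved, stated in full; the proofs are below) =====
def Claim_equal_expand_missing_addresses : Prop := ∀ (lines : List (Int × String)) (bin_size : Int), Dom_expand_missing_addresses lines bin_size → Pre_expand_missing_addresses lines bin_size → Spec_expand_missing_addresses lines bin_size (expand_missing_addresses lines bin_size)

-- ===== LEMMAS AND PROOFS =====

-- the block of output produced for one line with upper boundary address `bound`
def pvBlk (p : Int × String) (bound : Int) : List (Int × String) :=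
  p :: (PySem.List.pyRange (p.1 + 1) bound 1).map (fun a => (a, ""))

-- the block A emits at index i of its outer loop
def pvF (lines : List (Int × String)) (i : Int) : List (Int × String) :=
  pvBlk (PySem.List.pyGetD lines i (0, "")) ((PySem.List.pyGetD lines (i + 1) (0, "")).1)

theorem pv_range_remap (c nxt : Int) :
    (PySem.List.pyRange 1 (nxt - c) 1).map (fun j => (c + j, "")) =
    (PySem.List.pyRange (c + 1) nxt 1).map (fun a => (a, ("" : String))) := by
  simp only [PySem.List.pyRange_one, List.map_map]
  rw [show (nxt - c - 1).toNat = (nxt - (c + 1)).toNat by omega]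
  apply List.map_congr_left
  intro k _
  simp; ring

theorem pvStepA_eq (lines : List (Int × String)) (acc : List (Int × String)) (i : Int) :
    pvStepA lines acc i = acc ++ pvF lines i := by
  unfold pvStepA pvF pvBlk
  rw [PySem.List.foldl_append_singleton_eq_map]
  rw [show ∀ z : Int, z - (PySem.List.pyGetD lines i (0, "")).1 - 1 + 1
        = z - (PySem.List.pyGetD lines i (0, "")).1 from fun z => by ring]
  rw [pv_range_remap]
  simp

theorem pv_foldlA (lines : List (Int × String)) :
    ∀ (rng : List Int) (init : List (Int × String)),
      rng.foldl (pvStepA lines) init = init ++ rng.flatMap (pvF lines) := by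
  intro rng
  induction rng with
  | nil => simp
  | cons i t ih => intro init; simp [List.foldl_cons, pvStepA_eq, ih]

theorem pv_getD_cons (xs : List (Int × String)) (p : Int × String) (k : Nat) (d : Int × String) :
    PySem.List.pyGetD (p :: xs) ((k : Int) + 1) d = PySem.List.pyGetD xs (k : Int) d := by
  rw [show ((k : Int) + 1) = ((k + 1 : Nat) : Int) by push_cast; ring,
    PySem.List.pyGetD_natCast, PySem.List.pyGetD_natCast]
  simp

theorem pvF_cons (p : Int × String) (xs : List (Int × String)) (k : Nat) :
    pvF (p :: xs) ((k : Int) + 1) = pvF xs (k : Int) := by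
  unfold pvF
  rw [pv_getD_cons, show ((k : Int) + 1 + 1) = ((k + 1 : Nat) : Int) + 1 by push_cast; ring,
    pv_getD_cons]
  norm_cast

theorem pv_shift (p : Int × String) (xs : List (Int × String)) (m : Nat) :
    (PySem.List.pyRange 1 ((m : Int) + 1) 1).flatMap (pvF (p :: xs)) =
    (PySem.List.pyRange 0 (m : Int) 1).flatMap (pvF xs) := by
  simp only [PySem.List.pyRange_one]
  rw [show ((m : Int) + 1 - 1).toNat = ((m : Int) - 0).toNat by omega]
  simp only [List.flatMap_map]
  apply List.flatMap_congr
  intro k _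
  show pvF (p :: xs) (1 + (k : Int)) = pvF xs (0 + (k : Int))
  rw [show (1 + (k : Int)) = (k : Int) + 1 by ring,
    show ((0 : Int) + (k : Int)) = (k : Int) by ring, pvF_cons]

theorem A_closed (p : Int × String) (rest : List (Int × String)) (b : Int) :
    expand_missing_addresses (p :: rest) b =
      (PySem.List.pyRange 0 (((p :: rest).length : Int) - 1) 1).flatMap (pvF (p :: rest)) ++
        ((p :: rest).getLast (by simp) ::
          (PySem.List.pyRange (((p :: rest).getLast (by simp)).1 + 1) b 1).map (fun a => (a, ""))) := by
  unfold expand_missing_addresses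
  rw [PySem.List.pyGet?_neg_one, List.getLast?_eq_some_getLast (l := p :: rest) (by simp)]
  simp only [pv_foldlA, PySem.List.foldl_append_singleton_eq_map]
  simp

-- B's reverse foldl as a foldr, with a closed form for both state components
theorem pv_foldrB (l : List (Int × String)) (b : Int) :
    l.foldr
      (fun p s =>
        ((p :: (PySem.List.pyRange 1 (s.2 - p.1) 1).map (fun j => (p.1 + j, ""))) ++ s.1, p.1))
      (([] : List (Int × String)), b) =
    ((l.zip (l.tail.map Prod.fst ++ [b])).flatMap (fun pb => pvBlk pb.1 pb.2),
      match l with | [] => b | p :: _ => p.1) := by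
  induction l with
  | nil => simp
  | cons p t ih =>
    rw [List.foldr_cons, ih]
    cases t with
    | nil => simp [pvBlk, pv_range_remap]
    | cons q r => simp [pvBlk, pv_range_remap]

theorem alt_closed (lines : List (Int × String)) (b : Int) :
    expand_missing_addresses_alt lines b =
      (lines.zip (lines.tail.map Prod.fst ++ [b])).flatMap (fun pb => pvBlk pb.1 pb.2) := by
  unfold expand_missing_addresses_alt
  rw [List.foldl_reverse, pv_foldrB]

theorem alt_cons (p q : Int × String) (r : List (Int × String)) (b : Int) :
    expand_missing_addresses_alt (p :: q :: r) b =
      pvBlk p q.1 ++ expand_missing_addresses_alt (q :: r) b := by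
  rw [alt_closed, alt_closed]
  simp

theorem A_cons (p q : Int × String) (r : List (Int × String)) (b : Int) :
    expand_missing_addresses (p :: q :: r) b =
      pvBlk p q.1 ++ expand_missing_addresses (q :: r) b := by
  rw [A_closed, A_closed]
  rw [show (((p :: q :: r).length : Int) - 1) = ((r.length : Int) + 1) by simp]
  rw [PySem.List.pyRange_one_cons (by positivity)]
  rw [show ((0 : Int) + 1) = 1 by norm_num]
  rw [List.flatMap_cons, pv_shift p (q :: r) r.length]
  rw [show (((q :: r).length : Int) - 1) = (r.length : Int) by simp]
  have h0 : pvF (p :: q :: r) 0 = pvBlk p q.1 := by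
    unfold pvF
    rw [show ((0 : Int) + 1) = ((0 : Nat) : Int) + 1 by simp, pv_getD_cons]
    simp [PySem.List.pyGetD_zero_cons]
  rw [h0]
  simp [List.append_assoc]

theorem main_eq (rest : List (Int × String)) (p : Int × String) (b : Int) :
    expand_missing_addresses (p :: rest) b = expand_missing_addresses_alt (p :: rest) b := by
  induction rest generalizing p with
  | nil =>
    rw [A_closed, alt_closed]
    simp [pvBlk]
  | cons q r ih =>
    rw [A_cons, alt_cons, ih q]

-- ===== VERDICT (by name: the statement is the Claim_ definition above) =====
theorem expand_missing_addresses_spec : Claim_equal_expand_missing_addresses := by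
  intro lines bin_size _ hpre
  unfold Spec_expand_missing_addresses
  match lines with
  | [] => exact absurd rfl hpre
  | p :: rest => exact main_eq rest p bin_size
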